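-- pv_equiv track=rewrite | github.com/wanibisen3/cv-webapp | cv_engine.py | _is_certifications_heading
-- ===== SOURCE A (Python) =====
-- _CERTIFICATIONS_HEADINGS = frozenset({
--     "certifications", "certificates",
--     "licenses & certifications", "licenses and certifications",
--     "licences & certifications", "licences and certifications",
--     "professional certifications",
--     "certifications & licenses", "certifications and licenses",
--     "certifications & licences", "certifications and licences",
-- })
--
-- def _is_certifications_heading(text_lower: str) -> bool:
--     """True if this heading designates a dedicated Certifications bullet section."""
--     if not text_lower:
--         return False
--     if text_lower in _CERTIFICATIONS_HEADINGS:
--         return True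
--     if len(text_lower) > 60:
--         return False
--     for h in _CERTIFICATIONS_HEADINGS:
--         if text_lower == h or text_lower.startswith(h + " ") or text_lower.endswith(" " + h):
--             return True
--     return False
-- ===== SOURCE B (Python) =====
-- _CERTIFICATIONS_HEADINGS = frozenset({
--     "certifications", "certificates",
--     "licenses & certifications", "licenses and certifications",
--     "licences & certifications", "licences and certifications",
--     "professional certifications",
--     "certifications & licenses", "certifications and licenses",
--     "certifications & licences", "certifications and licences",
-- })
--
-- def _is_certifications_heading(text_lower: str) -> bool:
--     """True if this heading designates a dedicated Certifications bullet section."""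
--     if not text_lower:
--         return False
--     if text_lower in _CERTIFICATIONS_HEADINGS:
--         return True
--     if len(text_lower) > 60:
--         return False
--     for i, ch in enumerate(text_lower):
--         if ch == " " and (text_lower[:i] in _CERTIFICATIONS_HEADINGS
--                           or text_lower[i + 1:] in _CERTIFICATIONS_HEADINGS):
--             return True
--     return False
-- ===== Notes on version B (the rewrite author's own statement) =====
-- stated objective: alternative
-- what changed: Instead of looping over the heading set doing startswith/endswith string tests, B scans the space positions of the text and does two O(1) hash-set membership tests (prefix before the space, suffix after it) at each one.
import Mathlib
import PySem

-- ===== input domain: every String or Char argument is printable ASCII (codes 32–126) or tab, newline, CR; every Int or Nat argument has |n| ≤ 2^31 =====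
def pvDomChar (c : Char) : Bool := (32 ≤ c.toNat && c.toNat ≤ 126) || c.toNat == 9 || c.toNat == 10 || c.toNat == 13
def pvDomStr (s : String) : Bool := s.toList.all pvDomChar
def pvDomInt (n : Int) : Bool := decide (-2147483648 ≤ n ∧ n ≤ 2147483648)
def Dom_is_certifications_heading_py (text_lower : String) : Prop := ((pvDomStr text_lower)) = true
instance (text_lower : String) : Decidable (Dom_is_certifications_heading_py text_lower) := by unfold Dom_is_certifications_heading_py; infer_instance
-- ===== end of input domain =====

-- B scans the space positions of the text and tests prefix/suffix set membership there,
-- instead of A's loop over the heading set doing startswith/endswith tests; same results.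

-- the module constant _CERTIFICATIONS_HEADINGS (shared data, not code)
def certHeads : List (List Char) :=
  [ "certifications".toList, "certificates".toList,
    "licenses & certifications".toList, "licenses and certifications".toList,
    "licences & certifications".toList, "licences and certifications".toList,
    "professional certifications".toList,
    "certifications & licenses".toList, "certifications and licenses".toList,
    "certifications & licences".toList, "certifications and licences".toList ]

-- ===== PORT A =====
def isCertHeadingA (cs : List Char) : Bool :=
  if cs.isEmpty then false
  else if certHeads.contains cs then true
  else if cs.length > 60 then false
  else certHeads.any (fun h =>
    cs == h || PySem.Chars.startswith cs (h ++ [' ']) || PySem.Chars.endswith cs (' ' :: h))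

def is_certifications_heading_py (text_lower : String) : Bool :=
  isCertHeadingA text_lower.toList

-- ===== PORT B =====
def isCertHeadingB (cs : List Char) : Bool :=
  if cs.isEmpty then false
  else if certHeads.contains cs then true
  else if cs.length > 60 then false
  else (PySem.List.enumerate cs 0).any (fun p =>
    p.2 == ' ' &&
      (certHeads.contains (PySem.List.slice cs none (some p.1)) ||
       certHeads.contains (PySem.List.slice cs (some (p.1 + 1)) none)))

def is_certifications_heading_py_alt (text_lower : String) : Bool :=
  isCertHeadingB text_lower.toList

-- ===== PRECONDITION & SPEC =====
def Spec_is_certifications_heading_py (text_lower : String) (out : Bool) : Prop := out = is_certifications_heading_py_alt text_lower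
instance (text_lower : String) (out : Bool) : Decidable (Spec_is_certifications_heading_py text_lower out) := by unfold Spec_is_certifications_heading_py; infer_instance

-- ===== CLAIM (what is proved, stated in full; the proofs are below) =====
def Claim_equal_is_certifications_heading_py : Prop := ∀ (text_lower : String), Dom_is_certifications_heading_py text_lower → Spec_is_certifications_heading_py text_lower (is_certifications_heading_py text_lower)

-- ===== LEMMAS AND PROOFS =====

-- splitting a string at a space character
lemma split_at_space (cs : List Char) (k : Nat) (hk : k < cs.length) (hsp : cs[k] = ' ') :
    cs = cs.take k ++ ' ' :: cs.drop (k + 1) := by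
  conv_lhs => rw [← List.take_append_drop k cs]
  rw [List.drop_eq_getElem_cons hk, hsp]

-- the two `any` scans agree
lemma scans_agree (cs : List Char) (hmem : certHeads.contains cs = false) :
    certHeads.any (fun h =>
      cs == h || PySem.Chars.startswith cs (h ++ [' ']) || PySem.Chars.endswith cs (' ' :: h))
    = (PySem.List.enumerate cs 0).any (fun p =>
        p.2 == ' ' &&
          (certHeads.contains (PySem.List.slice cs none (some p.1)) ||
           certHeads.contains (PySem.List.slice cs (some (p.1 + 1)) none))) := by
  rw [Bool.eq_iff_iff, List.any_eq_true, List.any_eq_true]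
  constructor
  · rintro ⟨h, hh, hp⟩
    simp only [Bool.or_eq_true, beq_iff_eq] at hp
    rcases hp with (rfl | hpre) | hsuf
    · exact absurd (List.contains_iff_mem.mpr hh) (by rw [hmem]; simp)
    · -- cs starts with h ++ " ": the space at index h.length witnesses the scan
      rw [PySem.Chars.startswith_iff] at hpre
      obtain ⟨rest, hrest⟩ := hpre
      have hcs : cs = h ++ ' ' :: rest := by rw [← hrest]; simp
      subst hcs
      have hlen : h.length < (h ++ ' ' :: rest).length := by simp
      refine ⟨(((0 : Int) + h.length), ' '), ?_, ?_⟩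
      · rw [PySem.List.mem_enumerate_iff]
        exact ⟨h.length, hlen, by simp⟩
      · simp only [beq_self_eq_true, Bool.true_and, zero_add, Bool.or_eq_true]
        left
        rw [PySem.List.slice_to_natCast]
        simpa using List.contains_iff_mem.mpr hh
    · -- cs ends with " " ++ h: the space at index cs.length - h.length - 1 witnesses it
      rw [PySem.Chars.endswith_iff] at hsuf
      obtain ⟨init, hinit⟩ := hsuf
      have hcs : cs = init ++ ' ' :: h := hinit.symm
      subst hcs
      have hlen : init.length < (init ++ ' ' :: h).length := by simp
      refine ⟨(((0 : Int) + init.length), ' '), ?_, ?_⟩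
      · rw [PySem.List.mem_enumerate_iff]
        exact ⟨init.length, hlen, by simp⟩
      · simp only [beq_self_eq_true, Bool.true_and, zero_add, Bool.or_eq_true]
        right
        have hcast : ((init.length : Int) + 1) = ((init.length + 1 : Nat) : Int) := by push_cast; ring
        rw [hcast, PySem.List.slice_from_natCast]
        have hdrop : (init ++ ' ' :: h).drop (init.length + 1) = h := by
          rw [show init.length + 1 = (init ++ [' ']).length by simp,
              show init ++ ' ' :: h = (init ++ [' ']) ++ h by simp,
              List.drop_left]
        rw [hdrop]
        exact List.contains_iff_mem.mpr hh
  · rintro ⟨p, hp, hcond⟩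
    rw [PySem.List.mem_enumerate_iff] at hp
    obtain ⟨k, hk, rfl⟩ := hp
    simp only [zero_add, Bool.and_eq_true, beq_iff_eq, Bool.or_eq_true] at hcond
    obtain ⟨hsp, hor⟩ := hcond
    have hsplit := split_at_space cs k hk hsp
    rcases hor with hpre | hsuf
    · rw [PySem.List.slice_to_natCast] at hpre
      rw [List.contains_iff_mem] at hpre
      refine ⟨cs.take k, hpre, ?_⟩
      simp only [Bool.or_eq_true]
      left; right
      rw [PySem.Chars.startswith_iff]
      exact ⟨cs.drop (k + 1), by simpa using hsplit.symm⟩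
    · have hcast : ((k : Int) + 1) = ((k + 1 : Nat) : Int) := by push_cast; ring
      rw [hcast, PySem.List.slice_from_natCast] at hsuf
      rw [List.contains_iff_mem] at hsuf
      refine ⟨cs.drop (k + 1), hsuf, ?_⟩
      simp only [Bool.or_eq_true]
      right
      rw [PySem.Chars.endswith_iff]
      exact ⟨cs.take k, by conv_rhs => rw [hsplit]⟩

lemma ports_agree (cs : List Char) : isCertHeadingA cs = isCertHeadingB cs := by
  unfold isCertHeadingA isCertHeadingB
  split_ifs with h1 h2 h3
  · rfl
  · rfl
  · rfl
  · exact scans_agree cs (by simpa using h2)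

-- ===== VERDICT (by name: the statement is the Claim_ definition above) =====
theorem is_certifications_heading_py_spec : Claim_equal_is_certifications_heading_py := by
  intro t _
  show is_certifications_heading_py t = is_certifications_heading_py_alt t
  exact ports_agree t.toList
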